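-- pv_equiv track=rewrite | github.com/dev4-lbeb/GM_Upl_insertEPIGM | Controller/EpiController.py | list_to_xml
-- ===== SOURCE A (Python) =====
-- def list_to_xml(lista_de_novos_valores):
--     import xml.etree.ElementTree as ET
--     root = ET.Element('produtos')
--
--     for linha in lista_de_novos_valores:
--         produto = ET.SubElement(root, 'produto')
--         for nome_coluna, valor in linha:
--             elemento = ET.SubElement(produto, nome_coluna)
--             elemento.text = str(valor)
--
--     # Converte o elemento XML para uma string com a devida declaração XML
--     xml_declaration = '<?xml version="1.0" encoding="UTF-8"?>\n'
--     xml_string = xml_declaration + ET.tostring(root, encoding='unicode')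
--     return xml_string
-- ===== SOURCE B (Python) =====
-- _ESC = {'&': '&amp;', '<': '&lt;', '>': '&gt;'}
--
--
-- def _escape(texto):
--     return ''.join(_ESC.get(c, c) for c in texto)
--
--
-- def _elem(tag, conteudo):
--     if conteudo:
--         return f'<{tag}>{conteudo}</{tag}>'
--     return f'<{tag} />'
--
--
-- def list_to_xml(lista_de_novos_valores):
--     corpo = ''.join(
--         _elem('produto', ''.join(_elem(nome_coluna, _escape(str(valor)))
--                                  for nome_coluna, valor in linha))
--         for linha in lista_de_novos_valores)
--     return '<?xml version="1.0" encoding="UTF-8"?>\n' + _elem('produtos', corpo)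
-- ===== Notes on version B (the rewrite author's own statement) =====
-- stated objective: idiomatic
-- what changed: B skips ElementTree entirely: a single generic helper _elem(tag, content) renders an element (self-closing when its content is empty), and the whole document is built by nested ''.join comprehensions over the rows; Pre_ excludes inputs with a column name starting with '{', which ElementTree treats as namespace notation (ValueError or xmlns rewriting) while B renders the tag literally.
import Mathlib
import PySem

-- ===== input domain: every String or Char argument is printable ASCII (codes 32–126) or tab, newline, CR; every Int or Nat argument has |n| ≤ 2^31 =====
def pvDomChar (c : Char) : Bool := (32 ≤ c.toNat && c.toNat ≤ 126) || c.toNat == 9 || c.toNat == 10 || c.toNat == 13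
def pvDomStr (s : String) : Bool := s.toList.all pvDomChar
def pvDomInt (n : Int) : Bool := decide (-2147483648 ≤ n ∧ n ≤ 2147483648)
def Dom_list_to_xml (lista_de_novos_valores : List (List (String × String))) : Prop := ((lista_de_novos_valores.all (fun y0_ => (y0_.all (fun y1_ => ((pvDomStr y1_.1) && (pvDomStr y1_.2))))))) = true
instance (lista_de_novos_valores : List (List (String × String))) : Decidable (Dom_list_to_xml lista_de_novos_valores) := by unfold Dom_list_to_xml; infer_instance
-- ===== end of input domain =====

-- B builds the serialized XML string directly with one generic element-rendering helper instead of
-- constructing an ElementTree and serializing it (return value only; no side effects in either version).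

-- ===== PORT A =====
-- A builds an ElementTree whose shape is exactly the input (root 'produtos', one 'produto' child
-- per row, one leaf per (name, value) pair with text = value) and then calls ET.tostring.  The
-- tree A builds carries the same data as the input list, so the port keeps the input as the tree
-- and transcribes ElementTree's serializer on it, step for step:
--   _escape_cdata: replace '&' by '&amp;', '<' by '&lt;', '>' by '&gt;' in text.
def pvEtEscape (cs : List Char) : String :=
  match cs with
  | [] => ""
  | c :: rest =>
    (if c = '&' then "&amp;"
     else if c = '<' then "&lt;"
     else if c = '>' then "&gt;" else String.ofList [c]) ++ pvEtEscape rest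

-- _serialize_xml on a leaf element: no children; self-closing iff its text is falsy ('').
def pvEtSerializeLeaf (tag text : String) : String :=
  if text = "" then "<" ++ tag ++ " />"
  else "<" ++ tag ++ ">" ++ pvEtEscape text.toList ++ "</" ++ tag ++ ">"

-- _serialize_xml on a 'produto' element: no text; self-closing iff it has no children.
def pvEtSerializeProduto (linha : List (String × String)) : String :=
  match linha with
  | [] => "<produto />"
  | _ => "<produto>"
      ++ (linha.map (fun p => pvEtSerializeLeaf p.1 p.2)).foldl (· ++ ·) ""
      ++ "</produto>"

-- _serialize_xml on the root 'produtos' element, prefixed by the XML declaration A prepends.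
def list_to_xml (lista_de_novos_valores : List (List (String × String))) : String :=
  "<?xml version=\"1.0\" encoding=\"UTF-8\"?>\n" ++
  (match lista_de_novos_valores with
   | [] => "<produtos />"
   | _ => "<produtos>"
       ++ (lista_de_novos_valores.map pvEtSerializeProduto).foldl (· ++ ·) ""
       ++ "</produtos>")

-- ===== PORT B =====
-- the dict lookup _ESC.get(c, c) of Source B, per character
def pvEscChar (c : Char) : String :=
  if c = '&' then "&amp;" else if c = '<' then "&lt;" else if c = '>' then "&gt;" else String.ofList [c]

-- _escape: ''.join(_ESC.get(c, c) for c in texto)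
def pvEscape (texto : String) : String :=
  String.join (texto.toList.map pvEscChar)

-- _elem(tag, conteudo): render one element, self-closing when its content is empty
def pvElem (tag conteudo : String) : String :=
  if conteudo ≠ "" then "<" ++ tag ++ ">" ++ conteudo ++ "</" ++ tag ++ ">"
  else "<" ++ tag ++ " />"

-- list_to_xml of Source B: declaration + _elem('produtos', joined rows of joined cells)
def list_to_xml_alt (lista_de_novos_valores : List (List (String × String))) : String :=
  "<?xml version=\"1.0\" encoding=\"UTF-8\"?>\n" ++
    pvElem "produtos"
      (String.join (lista_de_novos_valores.map (fun linha =>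
        pvElem "produto"
          (String.join (linha.map (fun p => pvElem p.1 (pvEscape p.2)))))))

-- ===== PRECONDITION & SPEC =====
-- Pre_ excludes inputs with a column name beginning with '{': ElementTree treats such a tag as
-- namespace notation and either raises ValueError (no closing '}') or serializes it with
-- xmlns/ns0: prefixes, an artefact of ET's namespace machinery that no caller of this
-- row-to-XML helper would specify; B renders such tags literally.
def Pre_list_to_xml (lista_de_novos_valores : List (List (String × String))) : Prop :=
  (lista_de_novos_valores.all (fun linha =>
    linha.all (fun p => p.1.toList.head? ≠ some '{'))) = true
instance (lista_de_novos_valores : List (List (String × String))) : Decidable (Pre_list_to_xml lista_de_novos_valores) := by unfold Pre_list_to_xml; infer_instance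

def pvWitness_list_to_xml : (List (List (String × String))) :=
  [[("nome", "a&b"), ("preco", "")], []]

def Spec_list_to_xml (lista_de_novos_valores : List (List (String × String))) (out : String) : Prop := out = list_to_xml_alt lista_de_novos_valores
instance (lista_de_novos_valores : List (List (String × String))) (out : String) : Decidable (Spec_list_to_xml lista_de_novos_valores out) := by unfold Spec_list_to_xml; infer_instance

-- ===== CLAIM (what is proved, stated in full; the proofs are below) =====
def Claim_equal_list_to_xml : Prop := ∀ (lista_de_novos_valores : List (List (String × String))), Dom_list_to_xml lista_de_novos_valores → Pre_list_to_xml lista_de_novos_valores → Spec_list_to_xml lista_de_novos_valores (list_to_xml lista_de_novos_valores)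

-- ===== LEMMAS AND PROOFS =====

theorem pv_join_eq_foldl (l : List String) : String.join l = l.foldl (· ++ ·) "" := rfl

theorem pv_foldl_append (l : List String) (s : String) :
    l.foldl (· ++ ·) s = s ++ l.foldl (· ++ ·) "" := by
  induction l generalizing s with
  | nil => simp [List.foldl]
  | cons x xs ih =>
    simp only [List.foldl]
    rw [ih (s ++ x), ih ("" ++ x)]
    simp [String.append_assoc]

theorem pv_esc_eq (v : String) : pvEtEscape v.toList = pvEscape v := by
  unfold pvEscape
  rw [pv_join_eq_foldl]
  generalize v.toList = cs
  induction cs with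
  | nil => rfl
  | cons c rest ih =>
    simp only [pvEtEscape, List.map, List.foldl, pvEscChar]
    rw [ih]
    exact (pv_foldl_append _ _).symm

theorem pv_join_cons (x : String) (l : List String) :
    String.join (x :: l) = x ++ String.join l := by
  rw [pv_join_eq_foldl, List.foldl_cons, pv_foldl_append, ← pv_join_eq_foldl]
  simp

theorem pv_escChar_ne (c : Char) : pvEscChar c ≠ "" := by
  unfold pvEscChar
  split_ifs <;> first
    | decide
    | (intro h; simpa using congrArg String.toList h)

-- pvEscape s is empty exactly when s is
theorem pv_escape_empty_iff (s : String) : pvEscape s = "" ↔ s = "" := by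
  constructor
  · intro h
    by_cases hl : s.toList = []
    · exact String.toList_eq_nil_iff.mp hl
    · cases hc : s.toList with
      | nil => exact absurd hc hl
      | cons c r =>
        unfold pvEscape at h
        rw [hc, List.map_cons, pv_join_cons] at h
        exact absurd (String.append_eq_empty_iff.mp h).1 (pv_escChar_ne c)
  · intro h; subst h; rfl

-- a rendered element is never the empty string
theorem pv_elem_ne (tag conteudo : String) : pvElem tag conteudo ≠ "" := by
  unfold pvElem
  split_ifs <;> intro h
  · have h1 := (String.append_eq_empty_iff.mp h).1
    have h2 := (String.append_eq_empty_iff.mp h1).1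
    have h3 := (String.append_eq_empty_iff.mp h2).1
    have h4 := (String.append_eq_empty_iff.mp h3).1
    have h5 := (String.append_eq_empty_iff.mp h4).1
    exact absurd (String.append_eq_empty_iff.mp h5).1 (by decide)
  · have h1 := (String.append_eq_empty_iff.mp h).1
    exact absurd (String.append_eq_empty_iff.mp h1).1 (by decide)

-- a nonempty element fully rendered
theorem pv_elem_pos (tag J : String) (h : J ≠ "") :
    pvElem tag J = "<" ++ tag ++ ">" ++ J ++ ("</" ++ tag ++ ">") := by
  simp [pvElem, h, String.append_assoc]

theorem pv_leaf_eq (tag text : String) :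
    pvEtSerializeLeaf tag text = pvElem tag (pvEscape text) := by
  by_cases h : text = ""
  · subst h; rfl
  · have he : pvEscape text ≠ "" := fun hh => h ((pv_escape_empty_iff text).mp hh)
    rw [pv_elem_pos _ _ he]
    simp [pvEtSerializeLeaf, h, pv_esc_eq, String.append_assoc]

theorem pv_row_eq (linha : List (String × String)) :
    pvEtSerializeProduto linha
      = pvElem "produto" (String.join (linha.map (fun p => pvElem p.1 (pvEscape p.2)))) := by
  cases linha with
  | nil => rfl
  | cons p rest =>
    have hne : String.join ((p :: rest).map (fun q => pvElem q.1 (pvEscape q.2))) ≠ "" := by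
      rw [List.map_cons, pv_join_cons]
      intro h
      exact absurd (String.append_eq_empty_iff.mp h).1 (pv_elem_ne _ _)
    rw [pv_elem_pos _ _ hne]
    have hmap : (p :: rest).map (fun q => pvEtSerializeLeaf q.1 q.2)
        = (p :: rest).map (fun q => pvElem q.1 (pvEscape q.2)) :=
      List.map_congr_left fun q _ => pv_leaf_eq q.1 q.2
    simp only [pvEtSerializeProduto, hmap, ← pv_join_eq_foldl]
    rw [show ("<produto>" : String) = "<" ++ "produto" ++ ">" by decide,
        show ("</produto>" : String) = "</" ++ "produto" ++ ">" by decide]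

theorem pv_body_eq (l : List (List (String × String))) :
    (l.map pvEtSerializeProduto).foldl (· ++ ·) ""
      = String.join (l.map (fun linha =>
          pvElem "produto" (String.join (linha.map (fun p => pvElem p.1 (pvEscape p.2)))))) := by
  rw [← pv_join_eq_foldl]
  congr 1
  exact List.map_congr_left fun r _ => pv_row_eq r

-- ===== VERDICT (by name: the statement is the Claim_ definition above) =====
theorem list_to_xml_spec : Claim_equal_list_to_xml := by
  intro l _ _
  show list_to_xml l = list_to_xml_alt l
  cases l with
  | nil => rfl
  | cons r rest =>
    have hne : String.join ((r :: rest).map (fun linha =>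
        pvElem "produto" (String.join (linha.map (fun p => pvElem p.1 (pvEscape p.2)))))) ≠ "" := by
      rw [List.map_cons, pv_join_cons]
      intro h
      exact absurd (String.append_eq_empty_iff.mp h).1 (pv_elem_ne _ _)
    unfold list_to_xml list_to_xml_alt
    rw [pv_elem_pos _ _ hne, pv_body_eq]
    rw [show ("<produtos>" : String) = "<" ++ "produtos" ++ ">" by decide,
        show ("</produtos>" : String) = "</" ++ "produtos" ++ ">" by decide]
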